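-- pv_equiv track=rewrite | github.com/GitYohoo/En-podcasts | python/audio_pipeline.py | split_long_unit
-- ===== SOURCE A (Python) =====
-- def split_long_unit(unit: str) -> list[str]:
--     words = unit.split()
--     if len(words) <= 14:
--         return [unit]
--     midpoint = len(words) // 2
--     preferred = []
--     for index, word in enumerate(words):
--         stripped = word.strip(",.;:!?").lower()
--         if stripped in {"and", "but", "so", "because", "while", "then", "that", "which"}:
--             preferred.append(index)
--     if preferred:
--         midpoint = min(preferred, key=lambda idx: abs(idx - midpoint))
--     left = " ".join(words[: midpoint + 1]).strip()
--     right = " ".join(words[midpoint + 1 :]).strip()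
--     if not left or not right:
--         return [unit]
--     return [left, right]
-- ===== SOURCE B (Python) =====
-- CONJ = {"and", "but", "so", "because", "while", "then", "that", "which"}
--
--
-- def _is_conj(word):
--     return word.strip(",.;:!?").lower() in CONJ
--
--
-- def split_long_unit(unit: str) -> list[str]:
--     words = unit.split()
--     n = len(words)
--     if n <= 14:
--         return [unit]
--     mid = n // 2
--     split_at = mid
--     for d in range(n):
--         i = mid - d
--         if i >= 0 and _is_conj(words[i]):
--             split_at = i
--             break
--         j = mid + d
--         if d > 0 and j < n and _is_conj(words[j]):
--             split_at = j
--             break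
--     left = " ".join(words[: split_at + 1]).strip()
--     right = " ".join(words[split_at + 1 :]).strip()
--     if not left or not right:
--         return [unit]
--     return [left, right]
-- ===== Notes on version B (the rewrite author's own statement) =====
-- stated objective: alternative
-- what changed: A collects every conjunction index into a list and then min-searches it by distance to the midpoint; B never builds that list and instead searches outward from the midpoint (left offset before right at each distance), returning the first conjunction found, which reproduces A's smaller-index tie-break.
import Mathlib
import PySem

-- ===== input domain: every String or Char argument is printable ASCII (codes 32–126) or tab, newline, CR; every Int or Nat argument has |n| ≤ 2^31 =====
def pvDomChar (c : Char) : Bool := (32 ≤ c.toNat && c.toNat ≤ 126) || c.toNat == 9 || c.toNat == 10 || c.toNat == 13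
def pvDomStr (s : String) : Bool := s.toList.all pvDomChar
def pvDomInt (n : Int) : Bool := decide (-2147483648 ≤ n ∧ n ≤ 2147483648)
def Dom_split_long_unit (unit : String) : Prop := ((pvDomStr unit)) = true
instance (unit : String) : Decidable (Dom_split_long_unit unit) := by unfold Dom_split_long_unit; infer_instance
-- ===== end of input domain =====

-- B replaces A's collect-all-conjunction-indices + min-by-distance pass by a single outward
-- search from the midpoint (left offset first at each distance), a different decomposition of
-- the same split choice; objective: alternative (same asymptotic cost, no speed claim).

def pvConj : PySem.Set String :=
  PySem.Set.ofList ["and", "but", "so", "because", "while", "then", "that", "which"]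

-- ===== PORT A =====
def split_long_unit (unit : String) : List String :=
  let words := PySem.Str.split₀ unit
  if words.length ≤ 14 then [unit] else
  let midpoint : Int := PySem.Int.floordiv (words.length : Int) 2
  let preferred : List Int :=
    (PySem.List.enumerate words).foldl
      (fun acc p =>
        if PySem.Str.lower (PySem.Str.stripChars p.2 ",.;:!?") ∈ pvConj then acc ++ [p.1]
        else acc) []
  -- 'if preferred: midpoint = min(preferred, key=…)' — min? is none exactly when preferred == []
  let midpoint : Int :=
    match PySem.List.min? preferred (fun idx => |idx - midpoint|) with
    | some v => v
    | none => midpoint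
  let left := PySem.Str.strip (PySem.Str.join " " (PySem.List.slice words none (some (midpoint + 1))))
  let right := PySem.Str.strip (PySem.Str.join " " (PySem.List.slice words (some (midpoint + 1)) none))
  if left = "" ∨ right = "" then [unit] else [left, right]

-- ===== PORT B =====
def pvIsConj (w : String) : Bool :=
  decide (PySem.Str.lower (PySem.Str.stripChars w ",.;:!?") ∈ pvConj)

-- the loop 'for d in range(n)' with its two guarded early returns; words[·] is only read
-- at indices the guards prove in range, so pyGetD is exact there
def pvSearch (words : List String) (mid n : Int) : List Int → Int
  | [] => mid
  | d :: ds =>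
    if 0 ≤ mid - d ∧ pvIsConj (PySem.List.pyGetD words (mid - d) "") = true then mid - d
    else if 0 < d ∧ mid + d < n ∧ pvIsConj (PySem.List.pyGetD words (mid + d) "") = true then
      mid + d
    else pvSearch words mid n ds

def split_long_unit_alt (unit : String) : List String :=
  let words := PySem.Str.split₀ unit
  let n : Int := (words.length : Int)
  if words.length ≤ 14 then [unit] else
  let mid : Int := PySem.Int.floordiv n 2
  let splitAt := pvSearch words mid n (PySem.List.pyRange 0 n 1)
  let left := PySem.Str.strip (PySem.Str.join " " (PySem.List.slice words none (some (splitAt + 1))))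
  let right := PySem.Str.strip (PySem.Str.join " " (PySem.List.slice words (some (splitAt + 1)) none))
  if left = "" ∨ right = "" then [unit] else [left, right]

-- ===== PRECONDITION & SPEC =====
def Spec_split_long_unit (unit : String) (out : List String) : Prop := out = split_long_unit_alt unit
instance (unit : String) (out : List String) : Decidable (Spec_split_long_unit unit out) := by unfold Spec_split_long_unit; infer_instance

-- ===== CLAIM (what is proved, stated in full; the proofs are below) =====
def Claim_equal_split_long_unit : Prop := ∀ (unit : String), Dom_split_long_unit unit → Spec_split_long_unit unit (split_long_unit unit)

-- ===== LEMMAS AND PROOFS =====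

-- the fold inside PySem.List.min?
def pvG (key : Int → Int) : Option Int → Int → Option Int :=
  fun acc x =>
    match acc with
    | none => some x
    | some m => if key x < key m then some x else some m

theorem pvMin?_eq_foldl (xs : List Int) (key : Int → Int) :
    PySem.List.min? xs key = xs.foldl (pvG key) none := by
  unfold PySem.List.min? pvG
  congr 1
  funext acc x
  cases acc <;> rfl

theorem pvFoldl_keep (key : Int → Int) (t : List Int) (c : Int)
    (h : ∀ y ∈ t, key c ≤ key y) : t.foldl (pvG key) (some c) = some c := by
  induction t with
  | nil => rfl
  | cons x s ih =>
    have hx : ¬ key x < key c := not_lt.mpr (h x (by simp))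
    simp only [List.foldl, pvG, if_neg hx]
    exact ih (fun y hy => h y (by simp [hy]))

theorem pvFoldl_find (key : Int → Int) (t : List Int) (c r : Int)
    (hr : r ∈ t) (hmin : ∀ y ∈ t, key r ≤ key y) (hc : key r < key c)
    (hpw : t.Pairwise (· < ·)) (hfirst : ∀ y ∈ t, y < r → key r < key y) :
    t.foldl (pvG key) (some c) = some r := by
  induction t generalizing c with
  | nil => cases hr
  | cons x s ih =>
    by_cases hxr : x = r
    · subst hxr
      simp only [List.foldl, pvG, if_pos hc]
      exact pvFoldl_keep key s x (fun y hy => hmin y (List.mem_cons_of_mem _ hy))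
    · have hrs : r ∈ s := by
        rcases List.mem_cons.mp hr with h | h
        · exact absurd h.symm hxr
        · exact h
      have hxlt : x < r := (List.pairwise_cons.mp hpw).1 r hrs
      have hkx : key r < key x := hfirst x (List.mem_cons_self) hxlt
      have hmin2 : ∀ y ∈ s, key r ≤ key y := fun y hy => hmin y (List.mem_cons_of_mem _ hy)
      have hfirst2 : ∀ y ∈ s, y < r → key r < key y :=
        fun y hy => hfirst y (List.mem_cons_of_mem _ hy)
      have hpw2 := (List.pairwise_cons.mp hpw).2
      by_cases h : key x < key c
      · have step : (x :: s).foldl (pvG key) (some c) = s.foldl (pvG key) (some x) := by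
          simp only [List.foldl, pvG, if_pos h]
        rw [step]
        exact ih x hrs hmin2 hkx hpw2 hfirst2
      · have step : (x :: s).foldl (pvG key) (some c) = s.foldl (pvG key) (some c) := by
          simp only [List.foldl, pvG, if_neg h]
        rw [step]
        exact ih c hrs hmin2 hc hpw2 hfirst2

theorem pvMin?_eq_of (xs : List Int) (key : Int → Int) (r : Int)
    (hr : r ∈ xs) (hmin : ∀ y ∈ xs, key r ≤ key y)
    (hpw : xs.Pairwise (· < ·)) (hfirst : ∀ y ∈ xs, y < r → key r < key y) :
    PySem.List.min? xs key = some r := by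
  cases xs with
  | nil => cases hr
  | cons x s =>
    rw [pvMin?_eq_foldl]
    have hh : (x :: s).foldl (pvG key) none = s.foldl (pvG key) (some x) := rfl
    rw [hh]
    by_cases hxr : x = r
    · subst hxr
      exact pvFoldl_keep key s x (fun y hy => hmin y (List.mem_cons_of_mem _ hy))
    · have hrs : r ∈ s := by
        rcases List.mem_cons.mp hr with h | h
        · exact absurd h.symm hxr
        · exact h
      have hxlt : x < r := (List.pairwise_cons.mp hpw).1 r hrs
      exact pvFoldl_find key s x r hrs (fun y hy => hmin y (List.mem_cons_of_mem _ hy))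
        (hfirst x (List.mem_cons_self) hxlt) (List.pairwise_cons.mp hpw).2
        (fun y hy => hfirst y (List.mem_cons_of_mem _ hy))

-- B's search when no index hits
theorem pvSearch_none (words : List String) (mid n : Int)
    (hP : ∀ i : Int, 0 ≤ i → i < n → pvIsConj (PySem.List.pyGetD words i "") = false)
    (hmn : 0 ≤ mid ∧ mid < n) :
    ∀ l : List Int, (∀ d ∈ l, 0 ≤ d) → pvSearch words mid n l = mid := by
  intro l hl
  induction l with
  | nil => rfl
  | cons d ds ih =>
    have hd : 0 ≤ d := hl d (by simp)
    rw [pvSearch]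
    rw [if_neg, if_neg]
    · exact ih (fun x hx => hl x (by simp [hx]))
    · rintro ⟨h1, h2, h3⟩
      exact absurd h3 (by simp [hP (mid + d) (by omega) h2])
    · rintro ⟨h1, h2⟩
      exact absurd h2 (by simp [hP (mid - d) h1 (by omega)])

-- B's search when the closest hit is at distance D with r the chosen index
theorem pvSearch_hit (words : List String) (mid n : Int) (D : Int) (r : Int)
    (hmn : 0 ≤ mid ∧ mid < n) (hD0 : 0 ≤ D)
    (hnear : ∀ i : Int, 0 ≤ i → i < n → pvIsConj (PySem.List.pyGetD words i "") = true → D ≤ |i - mid|)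
    (hD : (0 ≤ mid - D ∧ pvIsConj (PySem.List.pyGetD words (mid - D) "") = true ∧ r = mid - D) ∨
          (¬ (0 ≤ mid - D ∧ pvIsConj (PySem.List.pyGetD words (mid - D) "") = true) ∧
            mid + D < n ∧ pvIsConj (PySem.List.pyGetD words (mid + D) "") = true ∧ r = mid + D)) :
    ∀ (k : Nat) (a : Int), a + k = n → 0 ≤ a → a ≤ D →
      pvSearch words mid n (PySem.List.pyRange a n 1) = r := by
  have hDn : D < n := by
    rcases hD with ⟨h1, _, _⟩ | ⟨_, h2, _, _⟩ <;> omega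
  intro k
  induction k with
  | zero => intro a ha h0 haD; omega
  | succ k ih =>
    intro a ha h0 haD
    have han : a < n := by omega
    rw [PySem.List.pyRange_one_cons han, pvSearch]
    by_cases heq : a = D
    · subst heq
      rcases hD with ⟨h1, h2, h3⟩ | ⟨h1, h2, h3, h4⟩
      · rw [if_pos ⟨h1, h2⟩]; omega
      · rw [if_neg h1, if_pos]
        · omega
        · refine ⟨?_, h2, h3⟩
          by_contra hD0'
          have : a = 0 := by omega
          subst this
          exact h1 ⟨by omega, by simpa using h3⟩
    · have haD' : a < D := by omega
      rw [if_neg, if_neg]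
      · exact ih (a + 1) (by omega) (by omega) (by omega)
      · rintro ⟨h1, h2, h3⟩
        have := hnear (mid + a) (by omega) h2 h3
        rw [abs_of_nonneg (by omega : (0:Int) ≤ mid + a - mid)] at this
        omega
      · rintro ⟨h1, h2⟩
        have := hnear (mid - a) h1 (by omega) h2
        rw [abs_of_nonpos (by omega : mid - a - mid ≤ 0)] at this
        omega

-- the chosen split index: A's min-by-distance over all conjunction indices equals B's outward search
theorem pvMid_eq (words : List String) (hlen : ¬ words.length ≤ 14) :
    (match PySem.List.min?
        ((PySem.List.enumerate words).foldl
          (fun acc p =>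
            if PySem.Str.lower (PySem.Str.stripChars p.2 ",.;:!?") ∈ pvConj then acc ++ [p.1]
            else acc) [])
        (fun idx => |idx - PySem.Int.floordiv (words.length : Int) 2|) with
     | some v => v
     | none => PySem.Int.floordiv (words.length : Int) 2) =
    pvSearch words (PySem.Int.floordiv (words.length : Int) 2) (words.length : Int)
      (PySem.List.pyRange 0 (words.length : Int) 1) := by
  have h15 : 15 ≤ (words.length : Int) := by
    have : 15 ≤ words.length := by omega
    exact_mod_cast this
  have hmn : 0 ≤ PySem.Int.floordiv (words.length : Int) 2 ∧
      PySem.Int.floordiv (words.length : Int) 2 < (words.length : Int) := by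
    unfold PySem.Int.floordiv
    rw [Int.fdiv_eq_ediv]
    simp only [show (0:Int) ≤ 2 ∨ (2:Int) ∣ (words.length : Int) ↔ True from by simp, if_true]
    omega
  set n : Int := (words.length : Int) with hn
  set m : Int := PySem.Int.floordiv n 2 with hm
  have hpref : ((PySem.List.enumerate words).foldl
      (fun acc p =>
        if PySem.Str.lower (PySem.Str.stripChars p.2 ",.;:!?") ∈ pvConj then acc ++ [p.1]
        else acc) ([] : List Int))
      = (PySem.List.pyRange 0 n 1).filter (fun j => pvIsConj (PySem.List.pyGetD words j "")) := by
    rw [PySem.List.foldl_append_ite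
      (fun p : Int × String => PySem.Str.lower (PySem.Str.stripChars p.2 ",.;:!?") ∈ pvConj)
      (fun p : Int × String => p.1)]
    rw [PySem.List.enumerate_eq_map_pyRange words ""]
    rw [List.filter_map, List.map_map]
    simp [Function.comp_def, pvIsConj]
    rfl
  rw [hpref]
  set P : Int → Bool := fun j => pvIsConj (PySem.List.pyGetD words j "") with hP
  by_cases hcase : (PySem.List.pyRange 0 n 1).filter P = []
  · rw [hcase]
    have hnone : PySem.List.min? ([] : List Int) (fun idx => |idx - m|) = none := rfl
    rw [hnone]
    have hnoP : ∀ i : Int, 0 ≤ i → i < n → P i = false := by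
      intro i h0 hi
      by_contra hPi
      have hmem : i ∈ (PySem.List.pyRange 0 n 1).filter P :=
        List.mem_filter.mpr ⟨PySem.List.mem_pyRange_one.mpr ⟨h0, hi⟩, by simpa using hPi⟩
      rw [hcase] at hmem
      cases hmem
    exact (pvSearch_none words m n hnoP hmn _
      (fun d hd => (PySem.List.mem_pyRange_one.mp hd).1)).symm
  · obtain ⟨i0, hi0⟩ := List.exists_mem_of_ne_nil _ hcase
    have h1 := List.mem_filter.mp hi0
    have h2 := PySem.List.mem_pyRange_one.mp h1.1
    have hQex : ∃ e : Nat, (0 ≤ m - (e : Int) ∧ P (m - (e : Int)) = true) ∨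
        (m + (e : Int) < n ∧ P (m + (e : Int)) = true) := by
      refine ⟨(i0 - m).natAbs, ?_⟩
      by_cases hle : i0 ≤ m
      · exact Or.inl ⟨by omega, by rw [show m - (((i0 - m).natAbs : Int)) = i0 by omega]; exact h1.2⟩
      · exact Or.inr ⟨by omega, by rw [show m + (((i0 - m).natAbs : Int)) = i0 by omega]; exact h1.2⟩
    have hQD := Nat.find_spec hQex
    set D : Int := ((Nat.find hQex : Nat) : Int) with hDdef
    have hD0 : 0 ≤ D := by positivity
    have hnear : ∀ i : Int, 0 ≤ i → i < n → P i = true → D ≤ |i - m| := by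
      intro i h0 hi hPi
      by_contra hni
      have habs : |i - m| = ((i - m).natAbs : Int) := Int.abs_eq_natAbs _
      have he : (i - m).natAbs < Nat.find hQex := by
        rw [habs] at hni
        omega
      refine Nat.find_min hQex he ?_
      by_cases hle : i ≤ m
      · exact Or.inl ⟨by omega, by rw [show m - (((i - m).natAbs : Int)) = i by omega]; exact hPi⟩
      · exact Or.inr ⟨by omega, by rw [show m + (((i - m).natAbs : Int)) = i by omega]; exact hPi⟩
    by_cases hc : 0 ≤ m - D ∧ P (m - D) = true
    · have hrD : |m - D - m| = D := by
        rw [abs_of_nonpos (by omega : m - D - m ≤ 0)]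
        omega
      have hminr := pvMin?_eq_of ((PySem.List.pyRange 0 n 1).filter P) (fun idx => |idx - m|)
        (m - D)
        (List.mem_filter.mpr ⟨PySem.List.mem_pyRange_one.mpr ⟨by omega, by omega⟩, hc.2⟩)
        (by
          intro y hy
          have hyf := List.mem_filter.mp hy
          have hyr := PySem.List.mem_pyRange_one.mp hyf.1
          simp only [hrD]
          exact hnear y hyr.1 hyr.2 hyf.2)
        ((PySem.List.pairwise_lt_pyRange_one 0 n).filter P)
        (by
          intro y hy hylt
          have hyf := List.mem_filter.mp hy
          have hyr := PySem.List.mem_pyRange_one.mp hyf.1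
          simp only [hrD]
          rw [abs_of_nonpos (by omega : y - m ≤ 0)]
          omega)
      rw [hminr]
      exact (pvSearch_hit words m n D (m - D) hmn hD0 hnear
        (Or.inl ⟨hc.1, hc.2, rfl⟩) n.toNat 0 (by omega) le_rfl hD0).symm
    · have hQright : m + D < n ∧ P (m + D) = true := hQD.resolve_left hc
      have hrD : |m + D - m| = D := by
        rw [abs_of_nonneg (by omega : 0 ≤ m + D - m)]
        omega
      have hminr := pvMin?_eq_of ((PySem.List.pyRange 0 n 1).filter P) (fun idx => |idx - m|)
        (m + D)
        (List.mem_filter.mpr ⟨PySem.List.mem_pyRange_one.mpr ⟨by omega, hQright.1⟩, hQright.2⟩)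
        (by
          intro y hy
          have hyf := List.mem_filter.mp hy
          have hyr := PySem.List.mem_pyRange_one.mp hyf.1
          simp only [hrD]
          exact hnear y hyr.1 hyr.2 hyf.2)
        ((PySem.List.pairwise_lt_pyRange_one 0 n).filter P)
        (by
          intro y hy hylt
          have hyf := List.mem_filter.mp hy
          have hyr := PySem.List.mem_pyRange_one.mp hyf.1
          have hge : D ≤ |y - m| := hnear y hyr.1 hyr.2 hyf.2
          simp only [hrD]
          by_contra hno
          have heq : |y - m| = D := by omega
          rcases (abs_eq hD0).mp heq with hpos | hneg
          · omega
          · exact hc ⟨by omega, by rw [show m - D = y by omega]; exact hyf.2⟩)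
      rw [hminr]
      exact (pvSearch_hit words m n D (m + D) hmn hD0 hnear
        (Or.inr ⟨hc, hQright.1, hQright.2, rfl⟩) n.toNat 0 (by omega) le_rfl hD0).symm


theorem pvMain (unit : String) : split_long_unit unit = split_long_unit_alt unit := by
  unfold split_long_unit split_long_unit_alt
  by_cases hlen : (PySem.Str.split₀ unit).length ≤ 14
  · simp only [if_pos hlen]
  · simp only [if_neg hlen]
    rw [pvMid_eq _ hlen]

-- ===== VERDICT (by name: the statement is the Claim_ definition above) =====
theorem split_long_unit_spec : Claim_equal_split_long_unit := by
  intro unit _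
  unfold Spec_split_long_unit
  exact pvMain unit
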